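-- pv_equiv track=rewrite | github.com/Guillermomd01/rank03 | ex02/py_pattern_tracker/py_pattern_tracker.py | pattern_tracker
-- ===== SOURCE A (Python) =====
-- def pattern_tracker(text: str) -> int:
--     prev_was_digit = False
--     count = 0
--     for c in text:
--         if c.isdigit():
--             if prev_was_digit:
--                 count += 1
--             prev_was_digit = True
--         else:
--             prev_was_digit = False
--     return count
-- ===== SOURCE B (Python) =====
-- def pattern_tracker(text: str) -> int:
--     # Run-length decomposition: collect the lengths of maximal digit runs,
--     # then a run of length r contributes r - 1 consecutive digit pairs.
--     runs = []
--     i, n = 0, len(text)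
--     while i < n:
--         if text[i].isdigit():
--             j = i
--             while j < n and text[j].isdigit():
--                 j += 1
--             runs.append(j - i)
--             i = j
--         else:
--             i += 1
--     return sum(r - 1 for r in runs)
-- ===== Notes on version B (the rewrite author's own statement) =====
-- stated objective: alternative
-- what changed: Replaced the char-by-char state machine threading a prev_was_digit flag by a run-length decomposition: an outer scan skips non-digits, an inner scan consumes each maximal digit run, the run lengths are collected in a list, and the result is the sum of (length - 1) over the runs.
import Mathlib
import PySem

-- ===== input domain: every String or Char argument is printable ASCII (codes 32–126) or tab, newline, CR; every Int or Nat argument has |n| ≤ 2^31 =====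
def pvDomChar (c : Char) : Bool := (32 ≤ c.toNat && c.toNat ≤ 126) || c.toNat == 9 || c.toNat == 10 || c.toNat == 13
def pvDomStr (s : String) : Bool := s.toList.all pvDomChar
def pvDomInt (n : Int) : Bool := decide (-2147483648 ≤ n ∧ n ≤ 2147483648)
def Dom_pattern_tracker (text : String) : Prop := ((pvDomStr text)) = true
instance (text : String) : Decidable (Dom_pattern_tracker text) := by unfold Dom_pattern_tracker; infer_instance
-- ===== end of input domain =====

-- B replaces A's prev_was_digit state machine by a run-length decomposition
-- (collect maximal digit-run lengths, sum (length - 1)); objective: alternative, same O(n) cost.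

-- ===== PORT A =====
-- the 'for c in text' loop with state (prev_was_digit, count)
def patLoopA : List Char → Bool → Int → Int
  | [], _, count => count
  | c :: rest, prev, count =>
    if PySem.Chars.isdigit c then
      patLoopA rest true (if prev then count + 1 else count)
    else
      patLoopA rest false count

def pattern_tracker (text : String) : Int :=
  patLoopA text.toList false 0

-- ===== PORT B =====
-- the inner 'while j < n and text[j].isdigit(): j += 1' loop: number of leading
-- digits consumed, and the remainder of the string after the run
def pvLeadRun : List Char → Nat × List Char
  | [] => (0, [])
  | c :: rest =>
    if PySem.Chars.isdigit c then
      ((pvLeadRun rest).1 + 1, (pvLeadRun rest).2)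
    else (0, c :: rest)

theorem pvLeadRun_len (l : List Char) : (pvLeadRun l).2.length ≤ l.length := by
  induction l with
  | nil => simp [pvLeadRun]
  | cons c rest ih =>
    simp only [pvLeadRun]
    split
    · exact le_trans ih (Nat.le_succ _)
    · simp

-- the outer 'while i < n' loop building runs (the list of maximal digit-run lengths)
def pvRunsB : List Char → List Nat
  | [] => []
  | c :: rest =>
    if PySem.Chars.isdigit c then
      ((pvLeadRun rest).1 + 1) :: pvRunsB (pvLeadRun rest).2
    else pvRunsB rest
termination_by l => l.length
decreasing_by
  · exact Nat.lt_succ_of_le (pvLeadRun_len rest)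
  · simp

-- sum(r - 1 for r in runs)
def pattern_tracker_alt (text : String) : Int :=
  ((pvRunsB text.toList).map (fun r : Nat => (r : Int) - 1)).sum

-- ===== PRECONDITION & SPEC =====
def Spec_pattern_tracker (text : String) (out : Int) : Prop := out = pattern_tracker_alt text
instance (text : String) (out : Int) : Decidable (Spec_pattern_tracker text out) := by unfold Spec_pattern_tracker; infer_instance

-- ===== CLAIM (what is proved, stated in full; the proofs are below) =====
def Claim_equal_pattern_tracker : Prop := ∀ (text : String), Dom_pattern_tracker text → Spec_pattern_tracker text (pattern_tracker text)

-- ===== LEMMAS AND PROOFS =====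
def pvHdDigit : List Char → Bool
  | [] => false
  | c :: _ => PySem.Chars.isdigit c

-- characterisation of A's loop: count + pairs already formed + carry from prev
def pvCountA (l : List Char) : Int := patLoopA l false 0

theorem patLoopA_eq (l : List Char) : ∀ (prev : Bool) (count : Int),
    patLoopA l prev count = count + pvCountA l + (if prev && pvHdDigit l then 1 else 0) := by
  induction l with
  | nil => intro prev count; cases prev <;> simp [patLoopA, pvCountA, pvHdDigit]
  | cons c r ih =>
    intro prev count
    by_cases hc : PySem.Chars.isdigit c
    · have hA : patLoopA (c :: r) prev count
          = patLoopA r true (if prev then count + 1 else count) := by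
        simp [patLoopA, hc]
      have hB : pvCountA (c :: r) = patLoopA r true 0 := by
        simp [pvCountA, patLoopA, hc]
      have hh : pvHdDigit (c :: r) = true := by simp [pvHdDigit, hc]
      rw [hA, hB, ih, ih true 0, hh]
      cases prev <;> cases hd : pvHdDigit r <;> simp <;> omega
    · have hA : patLoopA (c :: r) prev count = patLoopA r false count := by
        simp [patLoopA, hc]
      have hB : pvCountA (c :: r) = patLoopA r false 0 := by
        simp [pvCountA, patLoopA, hc]
      have hh : pvHdDigit (c :: r) = false := by simp [pvHdDigit, hc]
      rw [hA, hB, ih, ih false 0, hh]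
      simp

theorem pvCountA_cons_digit (c : Char) (l : List Char) (hc : PySem.Chars.isdigit c) :
    pvCountA (c :: l) = pvCountA l + (if pvHdDigit l then 1 else 0) := by
  have h : pvCountA (c :: l) = patLoopA l true 0 := by
    simp [pvCountA, patLoopA, hc]
  rw [h, patLoopA_eq]
  simp

theorem pvCountA_cons_nondigit (c : Char) (l : List Char) (hc : ¬ PySem.Chars.isdigit c) :
    pvCountA (c :: l) = pvCountA l := by
  simp [pvCountA, patLoopA, hc]

theorem pvCountA_digit_cons (c : Char) (l : List Char) (hc : PySem.Chars.isdigit c) :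
    pvCountA (c :: l) = ((pvLeadRun l).1 : Int) + pvCountA (pvLeadRun l).2 := by
  induction l generalizing c with
  | nil => simp [pvCountA, patLoopA, pvLeadRun, hc]
  | cons d r ih =>
    by_cases hd : PySem.Chars.isdigit d
    · rw [pvCountA_cons_digit c (d :: r) hc, ih d hd]
      have hh : pvHdDigit (d :: r) = true := by simp [pvHdDigit, hd]
      rw [hh]
      simp only [pvLeadRun, hd, reduceIte]
      push_cast
      ring
    · rw [pvCountA_cons_digit c (d :: r) hc]
      have hh : pvHdDigit (d :: r) = false := by simp [pvHdDigit, hd]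
      rw [hh]
      simp only [pvLeadRun, hd, Bool.false_eq_true, reduceIte]
      ring

theorem pvCountA_eq_runs (l : List Char) :
    pvCountA l = ((pvRunsB l).map (fun r : Nat => (r : Int) - 1)).sum := by
  induction l using pvRunsB.induct with
  | case1 => simp [pvCountA, patLoopA, pvRunsB]
  | case2 c rest hc ih =>
    rw [pvCountA_digit_cons c rest hc, ih, pvRunsB, if_pos hc]
    rw [List.map_cons, List.sum_cons]
    push_cast
    ring
  | case3 c rest hc ih =>
    rw [pvRunsB, if_neg hc, pvCountA_cons_nondigit c rest hc, ih]

-- ===== VERDICT (by name: the statement is the Claim_ definition above) =====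
theorem pattern_tracker_spec : Claim_equal_pattern_tracker := by
  intro text _
  show pattern_tracker text = pattern_tracker_alt text
  rw [pattern_tracker, pattern_tracker_alt, ← pvCountA, pvCountA_eq_runs]
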